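-- pv_equiv track=rewrite | github.com/lfoppiano/material-parsers | material_parsers/material_parser/material_parser_ml.py | cluster_by_label
-- ===== SOURCE A (Python) =====
-- def extract_label(item):
--     if type(item) is not str:
--         item = item[1]
--     if item == "O":
--         return "O"
--     return item.split('-<')[1][:-1]
--
-- def cluster_by_label(results):
--     def is_start_of_sequence(item):
--         return item[1].startswith('B-')
--
--     groups = []
--     for result in results:
--
--         sequences = []
--         current_sequence = []
--         for idx, item in enumerate(result):
--             if item[1] == "O":
--                 continue
--             if is_start_of_sequence(item):
--                 if len(current_sequence) > 0:
--                     sequences.append(current_sequence)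
--                     current_sequence = []
--             current_sequence.append(item)
--
--         if len(current_sequence) > 0:
--             sequences.append(current_sequence)
--
--         groups.append(
--             [{"text": str.strip("".join([seq[0] for seq in sequence])), "class": extract_label(sequence[0])} for
--              sequence in sequences])
--
--     return groups
-- ===== SOURCE B (Python) =====
-- def extract_label(item):
--     if type(item) is not str:
--         item = item[1]
--     if item == "O":
--         return "O"
--     return item.split('-<')[1][:-1]
--
--
-- def cluster_by_label(results):
--     def segments(toks):
--         # one right-to-left pass: token t joins the segment to its right
--         # unless that segment starts with a 'B-' token.
--         # rsegs holds the segments back-to-front, each segment reversed.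
--         rsegs = []
--         for t in reversed(toks):
--             if rsegs and not rsegs[-1][-1][1].startswith('B-'):
--                 rsegs[-1].append(t)
--             else:
--                 rsegs.append([t])
--         return [seg[::-1] for seg in reversed(rsegs)]
--
--     return [[{"text": "".join(t[0] for t in seq).strip(),
--               "class": extract_label(seq[0])}
--              for seq in segments([t for t in result if t[1] != "O"])]
--             for result in results]
-- ===== Notes on version B (the rewrite author's own statement) =====
-- stated objective: alternative
-- what changed: A scans each result forward with mutable sequences/current_sequence state, flushing on 'B-' starts and at the end; B first filters out 'O' tokens and then segments them in a single right-to-left pass in which each token joins the segment to its right unless that segment starts with a 'B-' token, building per-result output with comprehensions.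
import Mathlib
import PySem

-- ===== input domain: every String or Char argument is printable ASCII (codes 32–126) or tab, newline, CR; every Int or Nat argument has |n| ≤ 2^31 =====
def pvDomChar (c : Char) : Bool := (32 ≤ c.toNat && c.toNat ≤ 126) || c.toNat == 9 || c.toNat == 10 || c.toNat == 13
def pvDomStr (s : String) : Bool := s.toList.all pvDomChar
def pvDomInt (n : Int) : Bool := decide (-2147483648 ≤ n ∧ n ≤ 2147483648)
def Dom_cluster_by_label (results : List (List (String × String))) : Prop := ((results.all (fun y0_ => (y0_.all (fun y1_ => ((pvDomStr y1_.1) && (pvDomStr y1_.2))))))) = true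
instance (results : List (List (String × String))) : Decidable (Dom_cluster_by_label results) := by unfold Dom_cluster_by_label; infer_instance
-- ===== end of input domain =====

-- B replaces A's forward loop with mutable sequences/current_sequence state and a final
-- flush by filter-then-one-right-to-left-pass segmentation (alternative decomposition; same cost).

-- ===== PORT A =====
-- extract_label: item is always a (token, label) pair here, so 'item = item[1]' always fires.
def extract_label (item : String × String) : String :=
  let lab := item.2
  if lab = "O" then "O"
  else PySem.Str.slice (PySem.List.pyGetD ((PySem.Str.split? lab "-<").getD []) 1 "") none (some (-1))

-- the dict comprehension body shared verbatim by both Pythons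
-- (sequence[0] / seq[0] is provably on nonempty lists; headD supplies an unused default)
def pvDictsOf (sequences : List (List (String × String))) : List (List (String × String)) :=
  sequences.map (fun sequence =>
    [("text", PySem.Str.strip (PySem.Str.join "" (sequence.map (·.1)))),
     ("class", extract_label (sequence.headD ("", "")))])

-- loop body of A's inner 'for idx, item in enumerate(result)' (idx is unused in A)
def pvStepA (st : List (List (String × String)) × List (String × String))
    (item : String × String) : List (List (String × String)) × List (String × String) :=
  if item.2 = "O" then st
  else if PySem.Str.startswith item.2 "B-" then
    (if st.2.length > 0 then (st.1 ++ [st.2], [item]) else (st.1, st.2 ++ [item]))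
  else (st.1, st.2 ++ [item])

-- the trailing 'if len(current_sequence) > 0: sequences.append(current_sequence)'
def pvFlushA (st : List (List (String × String)) × List (String × String)) :
    List (List (String × String)) :=
  if st.2.length > 0 then st.1 ++ [st.2] else st.1

def cluster_by_label (results : List (List (String × String))) :
    List (List (List (String × String))) :=
  results.foldl (fun groups result =>
    groups ++ [pvDictsOf (pvFlushA (result.foldl pvStepA ([], [])))]) []

-- ===== PORT B =====
-- B's 'for t in reversed(toks)' pass keeping segments back-to-front (each reversed) and
-- reversing at the end is exactly a foldr building the segments front-first.
def pvSegments (toks : List (String × String)) : List (List (String × String)) :=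
  toks.foldr (fun t segs =>
    match segs with
    | [] => [[t]]
    | s :: ss =>
      if PySem.Str.startswith (s.headD ("", "")).2 "B-" then [t] :: s :: ss
      else (t :: s) :: ss) []

def cluster_by_label_alt (results : List (List (String × String))) :
    List (List (List (String × String))) :=
  results.map (fun result => pvDictsOf (pvSegments (result.filter (fun t => t.2 ≠ "O"))))

-- ===== PRECONDITION & SPEC =====
-- Pre_ excludes exactly the inputs on which Python A raises IndexError: some token whose
-- label is not "O" opens a sequence (its label starts with 'B-', or every earlier token of
-- its result is labelled "O") but its label does not contain '-<', so extract_label's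
-- split('-<')[1] fails.  B raises on exactly the same inputs.
def Pre_cluster_by_label (results : List (List (String × String))) : Prop :=
  (results.all (fun result =>
    result.zipIdx.all (fun p =>
      !(decide (p.1.2 ≠ "O") &&
        (PySem.Str.startswith p.1.2 "B-" || (result.take p.2).all (fun u => u.2 == "O"))) ||
      PySem.Str.isIn "-<" p.1.2))) = true
instance (results : List (List (String × String))) : Decidable (Pre_cluster_by_label results) := by
  unfold Pre_cluster_by_label; infer_instance

def pvWitness_cluster_by_label : (List (List (String × String))) :=
  [[("Fe ", "B-<material>"), ("2", "I-mat"), ("x", "O")]]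

def Spec_cluster_by_label (results : List (List (String × String))) (out : List (List (List (String × String)))) : Prop := out = cluster_by_label_alt results
instance (results : List (List (String × String))) (out : List (List (List (String × String)))) : Decidable (Spec_cluster_by_label results out) := by unfold Spec_cluster_by_label; infer_instance

-- ===== CLAIM (what is proved, stated in full; the proofs are below) =====
def Claim_equal_cluster_by_label : Prop := ∀ (results : List (List (String × String))), Dom_cluster_by_label results → Pre_cluster_by_label results → Spec_cluster_by_label results (cluster_by_label results)

-- ===== LEMMAS AND PROOFS =====

theorem pvSegments_cons (t : String × String) (ts : List (String × String)) :
    pvSegments (t :: ts) =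
      match pvSegments ts with
      | [] => [[t]]
      | s :: ss =>
        if PySem.Str.startswith (s.headD ("", "")).2 "B-" then [t] :: s :: ss
        else (t :: s) :: ss := rfl

-- the first segment of pvSegments (t :: ts) starts with t
-- Str.startswith on the literal "B-" unfolds definitionally to the Chars form
theorem pvSW (s : String) :
    PySem.Str.startswith s "B-" = PySem.Chars.startswith s.toList ['B', '-'] := rfl

theorem pvSegments_cons_head (t : String × String) (ts : List (String × String)) :
    ∃ r ss, pvSegments (t :: ts) = (t :: r) :: ss := by
  rw [pvSegments_cons]
  rcases pvSegments ts with _ | ⟨s, ss⟩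
  · exact ⟨[], [], rfl⟩
  · cases h : PySem.Chars.startswith ((s.head?.getD ("", "")).2).toList ['B', '-']
    · exact ⟨s, ss, by simp [pvSW, h]⟩
    · exact ⟨[], s :: ss, by simp [pvSW, h]⟩

-- how a pending current_sequence 'cur' merges with the segmentation of the rest
def pvGlue (cur : List (String × String)) (sgs : List (List (String × String))) :
    List (List (String × String)) :=
  if cur = [] then sgs else
  match sgs with
  | [] => [cur]
  | s :: ss =>
    if PySem.Str.startswith (s.headD ("", "")).2 "B-" then cur :: s :: ss
    else (cur ++ s) :: ss

theorem pvStepA_O (st : List (List (String × String)) × List (String × String))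
    (t : String × String) (h : t.2 = "O") : pvStepA st t = st := by
  simp [pvStepA, h]

theorem foldA_filter (ts : List (String × String))
    (st : List (List (String × String)) × List (String × String)) :
    ts.foldl pvStepA st = (ts.filter (fun t => t.2 ≠ "O")).foldl pvStepA st := by
  induction ts generalizing st with
  | nil => rfl
  | cons t ts ih =>
    by_cases h : t.2 = "O"
    · simp [List.filter_cons, h, List.foldl_cons, pvStepA_O _ _ h, ih]
    · simp [List.filter_cons, h, List.foldl_cons, ih]

theorem pvGlue_cons (t : String × String) (ts : List (String × String))
    (cur : List (String × String)) :
    pvGlue cur (pvSegments (t :: ts)) =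
      (if PySem.Str.startswith t.2 "B-" = true then
        (if cur = [] then [] else [cur]) ++ pvGlue [t] (pvSegments ts)
      else pvGlue (cur ++ [t]) (pvSegments ts)) := by
  rcases ts with _ | ⟨u, us⟩
  · cases hB : PySem.Chars.startswith t.2.toList ['B', '-'] <;>
      by_cases hc : cur = [] <;>
        simp [pvSegments, pvGlue, pvSW, hB, hc]
  · obtain ⟨r, ss, hseg⟩ := pvSegments_cons_head u us
    rw [pvSegments_cons, hseg]
    cases hU : PySem.Chars.startswith u.2.toList ['B', '-'] <;>
      cases hB : PySem.Chars.startswith t.2.toList ['B', '-'] <;>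
        by_cases hc : cur = [] <;>
          simp [pvGlue, pvSW, hU, hB, hc]

theorem foldA_glue (ts : List (String × String)) :
    ∀ (seqs : List (List (String × String))) (cur : List (String × String)),
      (∀ t ∈ ts, t.2 ≠ "O") →
      pvFlushA (ts.foldl pvStepA (seqs, cur)) = seqs ++ pvGlue cur (pvSegments ts) := by
  induction ts with
  | nil =>
    intro seqs cur _
    rcases cur with _ | ⟨c, cs⟩ <;> simp [pvFlushA, pvGlue, pvSegments]
  | cons t ts ih =>
    intro seqs cur h
    have hO : t.2 ≠ "O" := h t (by simp)
    have h' : ∀ x ∈ ts, x.2 ≠ "O" := fun x hx => h x (by simp [hx])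
    rw [List.foldl_cons, pvGlue_cons]
    cases hB : PySem.Chars.startswith t.2.toList ['B', '-']
    · have : pvStepA (seqs, cur) t = (seqs, cur ++ [t]) := by
        simp [pvStepA, hO, pvSW, hB]
      rw [this, ih _ _ h']
      simp [pvSW, hB]
    · by_cases hc : cur = []
      · have : pvStepA (seqs, cur) t = (seqs, [t]) := by
          subst hc; simp [pvStepA, hO, pvSW, hB]
        rw [this, ih _ _ h']
        simp [pvSW, hB, hc]
      · have hlen : cur.length > 0 := by
          rcases cur with _ | _ <;> simp_all
        have : pvStepA (seqs, cur) t = (seqs ++ [cur], [t]) := by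
          simp [pvStepA, hO, pvSW, hB, hlen]
        rw [this, ih _ _ h']
        simp [pvSW, hB, hc]

theorem inner_eq (result : List (String × String)) :
    pvFlushA (result.foldl pvStepA ([], [])) =
      pvSegments (result.filter (fun t => t.2 ≠ "O")) := by
  rw [foldA_filter]
  rw [foldA_glue _ [] [] (by intro t ht; exact of_decide_eq_true (List.mem_filter.mp ht).2)]
  simp [pvGlue]

-- ===== VERDICT (by name: the statement is the Claim_ definition above) =====
theorem cluster_by_label_spec : Claim_equal_cluster_by_label := by
  intro results _ _
  unfold Spec_cluster_by_label cluster_by_label cluster_by_label_alt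
  rw [PySem.List.foldl_append_singleton_eq_map]
  have : (fun result => pvDictsOf (pvFlushA (result.foldl pvStepA ([], [])))) =
      (fun result : List (String × String) =>
        pvDictsOf (pvSegments (result.filter (fun t => t.2 ≠ "O")))) :=
    funext fun r => by rw [inner_eq]
  rw [this]
  simp
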